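-- pv_equiv track=rewrite | github.com/wildangbudhi/Alpha-Beta-Pruning---Tic-Tac-Toe | Python/BitMask.py | Hash
-- ===== SOURCE A (Python) =====
-- def Hash(state):
--     count = 0
--     res = 0
--
--     for i in range(0, len(state)):
--         for j in range(0, len(state[i])):
--             temp = 1
--             if(state[i][j] == 'X'): res = res | ( temp << (2 * count) )
--             elif(state[i][j] == 'O'): res = res | ( temp << ((2 * count) + 1) )
--             count = count + 1
--
--     return res
-- ===== SOURCE B (Python) =====
-- DIGIT = {'X': 1, 'O': 2}
--
-- def Hash(state):
--     # Horner's method: the mask is the base-4 number whose digit at the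
--     # flattened cell index is 0/1/2; accumulate back-to-front.
--     res = 0
--     for row in reversed(state):
--         for cell in reversed(row):
--             res = res * 4 + DIGIT.get(cell, 0)
--     return res
-- ===== Notes on version B (the rewrite author's own statement) =====
-- stated objective: simpler
-- what changed: Replaces the bit-OR of explicitly shifted bits indexed by a running cell counter with a Horner multiply-accumulate (res = res*4 + digit) over the cells traversed back-to-front, with the cell symbol mapped through a dict; no counter and no bit operations remain.
import Mathlib
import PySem

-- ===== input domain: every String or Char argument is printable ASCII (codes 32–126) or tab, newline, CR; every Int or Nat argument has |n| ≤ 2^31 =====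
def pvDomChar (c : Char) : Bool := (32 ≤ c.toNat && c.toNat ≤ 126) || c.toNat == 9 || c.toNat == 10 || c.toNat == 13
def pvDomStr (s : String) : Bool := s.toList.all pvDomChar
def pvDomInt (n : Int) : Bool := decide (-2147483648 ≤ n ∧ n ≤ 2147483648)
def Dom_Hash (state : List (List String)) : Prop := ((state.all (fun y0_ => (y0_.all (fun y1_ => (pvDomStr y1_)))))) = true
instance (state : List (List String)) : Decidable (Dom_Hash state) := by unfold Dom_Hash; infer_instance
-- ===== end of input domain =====

-- B replaces A's counter-indexed bit-OR-of-shifts with a Horner multiply-accumulate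
-- over the cells traversed back-to-front (objective: simpler).

-- ===== PORT A =====
-- A's loop state: (count, res); all Python values here are nonnegative ints,
-- tracked as Nat (|, << on nonnegative ints are Nat's |||, <<<) and cast to Int at return.
def hashStepA (p : Nat × Nat) (cell : String) : Nat × Nat :=
  let temp : Nat := 1
  let res :=
    if cell == "X" then p.2 ||| (temp <<< (2 * p.1))
    else if cell == "O" then p.2 ||| (temp <<< (2 * p.1 + 1))
    else p.2
  (p.1 + 1, res)

def Hash (state : List (List String)) : Int :=
  ((state.foldl (fun p row => row.foldl hashStepA p) ((0 : Nat), (0 : Nat))).2 : Int)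

-- ===== PORT B =====
def pvDIGIT : PySem.Dict String Int := PySem.Dict.ofList [("X", 1), ("O", 2)]

def Hash_alt (state : List (List String)) : Int :=
  state.reverse.foldl
    (fun res row =>
      row.reverse.foldl (fun res cell => res * 4 + PySem.Dict.getD pvDIGIT cell 0) res)
    0

-- ===== PRECONDITION & SPEC =====
def Spec_Hash (state : List (List String)) (out : Int) : Prop := out = Hash_alt state
instance (state : List (List String)) (out : Int) : Decidable (Spec_Hash state out) := by unfold Spec_Hash; infer_instance

-- ===== CLAIM (what is proved, stated in full; the proofs are below) =====
def Claim_equal_Hash : Prop := ∀ (state : List (List String)), Dom_Hash state → Spec_Hash state (Hash state)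

-- ===== LEMMAS AND PROOFS =====

/-- The base-4 digit of one cell. -/
def pvDig (cell : String) : Nat :=
  if cell == "X" then 1 else if cell == "O" then 2 else 0

/-- Base-4 value of a flattened list of cells, position 0 = lowest digit. -/
def pvEnc : List String → Nat
  | [] => 0
  | c :: cs => pvDig c + 4 * pvEnc cs

theorem pvDig_lt (cell : String) : pvDig cell < 4 := by
  unfold pvDig; split_ifs <;> omega

theorem pvEnc_lt (cs : List String) : pvEnc cs < 4 ^ cs.length := by
  induction cs with
  | nil => simp [pvEnc]
  | cons c cs ih =>
    have := pvDig_lt c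
    simp only [pvEnc, List.length_cons, pow_succ]
    omega

theorem pvEnc_append (xs ys : List String) :
    pvEnc (xs ++ ys) = pvEnc xs + 4 ^ xs.length * pvEnc ys := by
  induction xs with
  | nil => simp [pvEnc]
  | cons x xs ih => simp [pvEnc, ih, pow_succ]; ring

theorem pvFourPow (c : Nat) : (4 : Nat) ^ c = 2 ^ (2 * c) := by
  rw [Nat.pow_mul]

theorem pvOr_two_pow {r k : Nat} (h : r < 2 ^ k) : r ||| 1 <<< k = r + 2 ^ k := by
  rw [Nat.lor_comm, ← Nat.shiftLeft_add_eq_or_of_lt h 1, Nat.one_shiftLeft]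
  omega

theorem pvOr_two_pow_succ {r k : Nat} (h : r < 2 ^ k) :
    r ||| 1 <<< (k + 1) = r + 2 * 2 ^ k := by
  have h2 : r < 2 ^ (k + 1) := lt_of_lt_of_le h (Nat.pow_le_pow_right (by omega) (by omega))
  rw [pvOr_two_pow h2, pow_succ]
  omega

/-- One row of A's fold from state (c, r): count advances by the row length,
    res gains the row's base-4 value at weight 4^c. -/
theorem hashStepA_row (cs : List String) :
    ∀ c r, r < 4 ^ c →
      cs.foldl hashStepA (c, r) = (c + cs.length, r + 4 ^ c * pvEnc cs) := by
  induction cs with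
  | nil => intro c r _; simp [pvEnc]
  | cons cell cs ih =>
    intro c r hr
    have hr2 : r < 2 ^ (2 * c) := by rw [← pvFourPow]; exact hr
    have hstep : (hashStepA (c, r) cell) = (c + 1, r + pvDig cell * 4 ^ c) := by
      simp only [hashStepA, pvDig, Prod.mk.injEq, true_and]
      split_ifs with h1 h2
      · rw [pvOr_two_pow hr2, pvFourPow]; ring
      · rw [pvOr_two_pow_succ hr2, pvFourPow]
      · ring
    have hlt : r + pvDig cell * 4 ^ c < 4 ^ (c + 1) := by
      have := pvDig_lt cell
      have h4 : 0 < (4 : Nat) ^ c := pow_pos (by omega) c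
      simp only [pow_succ]
      nlinarith
    rw [List.foldl_cons, hstep, ih (c + 1) _ hlt]
    simp only [pvEnc, List.length_cons, pow_succ, Prod.mk.injEq]
    exact ⟨by omega, by ring⟩

theorem hashA_state (state : List (List String)) :
    ∀ c r, r < 4 ^ c →
      state.foldl (fun p row => row.foldl hashStepA p) (c, r)
        = (c + state.flatten.length, r + 4 ^ c * pvEnc state.flatten) := by
  induction state with
  | nil => intro c r _; simp [pvEnc]
  | cons row rest ih =>
    intro c r hr
    have hlt : r + 4 ^ c * pvEnc row < 4 ^ (c + row.length) := by
      have h1 := pvEnc_lt row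
      have h4 : 0 < (4 : Nat) ^ c := pow_pos (by omega) c
      rw [pow_add]
      nlinarith
    rw [List.foldl_cons, hashStepA_row row c r hr, ih _ _ hlt]
    simp only [List.flatten_cons, List.length_append, pvEnc_append, pow_add, Prod.mk.injEq]
    exact ⟨by omega, by ring⟩

theorem pvDigit_dict (cell : String) :
    PySem.Dict.getD pvDIGIT cell 0 = (pvDig cell : Int) := by
  have hitems : pvDIGIT.items = [("X", 1), ("O", 2)] := by decide
  by_cases h1 : cell = "X"
  · subst h1; simp [pvDig]; decide
  · by_cases h2 : cell = "O"
    · subst h2; simp [pvDig]; decide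
    · have hx : ("X" == cell) = false := beq_eq_false_iff_ne.mpr (fun h => h1 h.symm)
      have ho : ("O" == cell) = false := beq_eq_false_iff_ne.mpr (fun h => h2 h.symm)
      simp only [PySem.Dict.getD, PySem.Dict.get?, hitems, List.find?, hx, ho]
      simp [pvDig, h1, h2]

theorem hashB_row (cs : List String) (r : Int) :
    cs.foldr (fun cell res => res * 4 + PySem.Dict.getD pvDIGIT cell 0) r
      = r * 4 ^ cs.length + (pvEnc cs : Int) := by
  induction cs with
  | nil => simp [pvEnc]
  | cons c cs ih =>
    rw [List.foldr_cons, ih, pvDigit_dict]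
    simp only [pvEnc, List.length_cons, pow_succ]
    push_cast
    ring

theorem hashB_state (state : List (List String)) (r : Int) :
    state.foldr
        (fun row res =>
          row.foldr (fun cell res => res * 4 + PySem.Dict.getD pvDIGIT cell 0) res) r
      = r * 4 ^ state.flatten.length + (pvEnc state.flatten : Int) := by
  induction state with
  | nil => simp [pvEnc]
  | cons row rest ih =>
    rw [List.foldr_cons, hashB_row, ih]
    simp only [List.flatten_cons, List.length_append, pvEnc_append, pow_add]
    push_cast
    ring

-- ===== VERDICT (by name: the statement is the Claim_ definition above) =====
theorem Hash_spec : Claim_equal_Hash := by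
  intro state _
  unfold Spec_Hash Hash Hash_alt
  rw [hashA_state state 0 0 (by simp)]
  have := hashB_state state 0
  simp only [List.foldl_reverse] at this ⊢
  rw [this]
  simp
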